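-- pv_equiv track=rewrite | github.com/yahyaaljudiey-rgb/hikmah-academy | import_data.py | resolve_target_sheets
-- ===== SOURCE A (Python) =====
-- from typing import Dict, Iterable, Optional
--
-- def normalize_sheet_name(name: str) -> str:
--     return name.strip()
--
-- def resolve_target_sheets(
--     available_sheets: Iterable[str], target_sheets: Iterable[str]
-- ) -> Dict[str, str]:
--     normalized = {normalize_sheet_name(sheet): sheet for sheet in available_sheets}
--     resolved: Dict[str, str] = {}
--
--     for target in target_sheets:
--         actual = normalized.get(normalize_sheet_name(target))
--         if actual:
--             resolved[target] = actual
--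
--     return resolved
-- ===== SOURCE B (Python) =====
-- def resolve_target_sheets(available_sheets, target_sheets):
--     resolved = {}
--     for target in target_sheets:
--         key = target.strip()
--         match = None
--         for sheet in available_sheets:
--             if sheet.strip() == key:
--                 match = sheet
--         if match:
--             resolved[target] = match
--     return resolved
-- ===== Notes on version B (the rewrite author's own statement) =====
-- stated objective: alternative
-- what changed: Replaces the pre-built normalized-name dict with a direct per-target linear scan of available_sheets keeping the last stripped-name match (mirroring dict last-wins), so no index structure is built.
import Mathlib
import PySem

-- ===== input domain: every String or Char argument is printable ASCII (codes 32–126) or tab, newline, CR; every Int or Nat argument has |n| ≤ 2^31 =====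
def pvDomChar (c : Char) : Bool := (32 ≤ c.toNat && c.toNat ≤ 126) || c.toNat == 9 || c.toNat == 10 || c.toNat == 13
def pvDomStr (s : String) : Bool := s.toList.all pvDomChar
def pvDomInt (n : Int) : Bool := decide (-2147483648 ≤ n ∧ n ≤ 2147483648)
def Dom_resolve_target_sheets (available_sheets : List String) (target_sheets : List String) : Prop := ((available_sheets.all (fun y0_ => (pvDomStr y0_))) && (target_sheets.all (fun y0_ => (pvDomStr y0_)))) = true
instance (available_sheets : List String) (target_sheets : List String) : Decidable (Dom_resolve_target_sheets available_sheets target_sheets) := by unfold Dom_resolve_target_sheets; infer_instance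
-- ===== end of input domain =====

-- B replaces the pre-built normalized-name dict with a per-target linear scan keeping the last stripped-name match (alternative decomposition, same results).


-- ===== PORT A =====
def resolve_target_sheets (available_sheets : List String) (target_sheets : List String) : List (String × String) :=
  let normalized : PySem.Dict String String :=
    available_sheets.foldl (fun d sheet => d.insert (PySem.Str.strip sheet) sheet) PySem.Dict.empty
  let resolved : PySem.Dict String String :=
    target_sheets.foldl (fun r target =>
      match normalized.get? (PySem.Str.strip target) with
      | some actual => if actual ≠ "" then r.insert target actual else r
      | none => r) PySem.Dict.empty
  resolved.items

-- ===== PORT B =====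
def resolve_target_sheets_alt (available_sheets : List String) (target_sheets : List String) : List (String × String) :=
  let resolved : PySem.Dict String String :=
    target_sheets.foldl (fun r target =>
      let key := PySem.Str.strip target
      let m := available_sheets.foldl
        (fun m sheet => if PySem.Str.strip sheet == key then some sheet else m)
        (none : Option String)
      match m with
      | some mtch => if mtch ≠ "" then r.insert target mtch else r
      | none => r) PySem.Dict.empty
  resolved.items

-- ===== PRECONDITION & SPEC =====
def Spec_resolve_target_sheets (available_sheets : List String) (target_sheets : List String) (out : List (String × String)) : Prop := out = resolve_target_sheets_alt available_sheets target_sheets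
instance (available_sheets : List String) (target_sheets : List String) (out : List (String × String)) : Decidable (Spec_resolve_target_sheets available_sheets target_sheets out) := by unfold Spec_resolve_target_sheets; infer_instance

-- ===== CLAIM (what is proved, stated in full; the proofs are below) =====
def Claim_equal_resolve_target_sheets : Prop := ∀ (available_sheets : List String) (target_sheets : List String), Dom_resolve_target_sheets available_sheets target_sheets → Spec_resolve_target_sheets available_sheets target_sheets (resolve_target_sheets available_sheets target_sheets)

-- ===== LEMMAS AND PROOFS =====
-- The normalized dict's lookup equals a last-wins linear scan over available_sheets.
theorem get?_foldl_insert_strip (av : List String) (d : PySem.Dict String String) (key : String) :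
    (av.foldl (fun d s => d.insert (PySem.Str.strip s) s) d).get? key
      = av.foldl (fun m s => if PySem.Str.strip s == key then some s else m) (d.get? key) := by
  induction av generalizing d with
  | nil => rfl
  | cons s rest ih =>
      simp only [List.foldl_cons, ih, PySem.Dict.get?_insert]
      by_cases h : key = PySem.Str.strip s
      · simp [h]
      · have h' : (PySem.Str.strip s == key) = false := by
          simp [Ne.symm h]
        simp [h, h']


-- ===== VERDICT (by name: the statement is the Claim_ definition above) =====
theorem resolve_target_sheets_spec : Claim_equal_resolve_target_sheets := by
  intro av ts _
  unfold Spec_resolve_target_sheets resolve_target_sheets resolve_target_sheets_alt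
  simp only [get?_foldl_insert_strip, PySem.Dict.get?_empty]
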